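-- pv_equiv track=rewrite | github.com/ViniciusOliveiraAndrade/-.CLASS.-CInAulas | IP/Respostas Professor/L1Q9.py | serie9
-- ===== SOURCE A (Python) =====
-- def serie9(n):
-- 	res = -1
-- 	for i in range(2,n+1):
-- 		if i % 2 == 0:
-- 			res += 1
-- 		else:
-- 			res += 5
-- 	return res
-- ===== SOURCE B (Python) =====
-- def serie9(n):
--     if n < 2:
--         return -1
--     return -1 + n // 2 + 5 * ((n - 1) // 2)
-- ===== Notes on version B (the rewrite author's own statement) =====
-- stated objective: faster
-- what changed: Replaced the linear loop over the range with a constant-time closed form computed from the counts of even and odd terms via floor division.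
import Mathlib
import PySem

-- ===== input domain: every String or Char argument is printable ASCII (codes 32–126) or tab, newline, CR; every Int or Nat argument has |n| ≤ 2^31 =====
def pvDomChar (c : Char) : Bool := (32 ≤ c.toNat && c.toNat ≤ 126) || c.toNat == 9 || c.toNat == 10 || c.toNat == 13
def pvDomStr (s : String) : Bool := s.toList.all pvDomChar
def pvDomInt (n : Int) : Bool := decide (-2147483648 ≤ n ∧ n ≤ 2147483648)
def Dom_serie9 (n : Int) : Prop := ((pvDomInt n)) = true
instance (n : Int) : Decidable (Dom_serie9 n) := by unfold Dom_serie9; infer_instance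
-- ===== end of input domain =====

-- B replaces A's linear loop with an O(1) closed form (even/odd counts via floor division); proved equal for all n.
-- ===== PORT A =====
def serie9 (n : Int) : Int :=
  (PySem.List.pyRange 2 (n+1) 1).foldl
    (fun res i => if PySem.Int.mod i 2 == 0 then res + 1 else res + 5) (-1)

-- ===== PORT B =====
-- closed form: O(1) instead of A's O(n) loop
def serie9_alt (n : Int) : Int :=
  if n < 2 then -1
  else -1 + PySem.Int.floordiv n 2 + 5 * PySem.Int.floordiv (n - 1) 2

-- ===== PRECONDITION & SPEC =====
def Spec_serie9 (n : Int) (out : Int) : Prop := out = serie9_alt n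
instance (n : Int) (out : Int) : Decidable (Spec_serie9 n out) := by unfold Spec_serie9; infer_instance

-- ===== CLAIM (what is proved, stated in full; the proofs are below) =====
def Claim_equal_serie9 : Prop := ∀ (n : Int), Dom_serie9 n → Spec_serie9 n (serie9 n)

-- ===== LEMMAS AND PROOFS =====
theorem serie9_step (n : Int) (h : 2 ≤ n) :
    serie9 n = serie9 (n - 1) + (if n % 2 = 0 then 1 else 5) := by
  unfold serie9
  have h1 : (2 : Int) ≤ n := h
  have : PySem.List.pyRange 2 (n + 1) 1 = PySem.List.pyRange 2 n 1 ++ [n] := by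
    have := PySem.List.pyRange_one_succ_right (a := 2) (b := n) h1
    simpa using this
  rw [this, List.foldl_append]
  have hn1 : n - 1 + 1 = n := by ring
  rw [hn1]
  simp only [List.foldl_cons, List.foldl_nil]
  rw [PySem.Int.mod_eq_emod_of_pos (a := n) (b := 2) (by norm_num)]
  simp only [beq_iff_eq]
  split <;> rfl

theorem serie9_alt_eq (n : Int) : serie9 n = serie9_alt n := by
  rcases le_or_gt n 1 with hle | hgt
  · unfold serie9 serie9_alt
    rw [PySem.List.pyRange_one_eq_nil (by omega)]
    simp [hle]
  · -- n ≥ 2 : induction on (n - 1).toNat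
    have key : ∀ (k : Nat), serie9 (1 + (k : Int)) = serie9_alt (1 + (k : Int)) := by
      intro k
      induction k with
      | zero =>
        unfold serie9 serie9_alt
        rw [PySem.List.pyRange_one_eq_nil (by norm_num)]
        norm_num
      | succ m ih =>
        have hm : (2 : Int) ≤ 1 + ((m + 1 : Nat) : Int) := by push_cast; omega
        rw [serie9_step _ hm]
        have : (1 : Int) + ((m + 1 : Nat) : Int) - 1 = 1 + (m : Int) := by push_cast; ring
        rw [this, ih]
        unfold serie9_alt
        rw [PySem.Int.floordiv_eq_ediv_of_pos (by norm_num),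
            PySem.Int.floordiv_eq_ediv_of_pos (by norm_num),
            PySem.Int.floordiv_eq_ediv_of_pos (by norm_num),
            PySem.Int.floordiv_eq_ediv_of_pos (by norm_num)]
        push_cast
        split_ifs <;> omega
    have hk : n = 1 + ((n - 1).toNat : Int) := by omega
    rw [hk]; exact key _

-- ===== VERDICT (by name: the statement is the Claim_ definition above) =====
theorem serie9_spec : Claim_equal_serie9 := by
  intro n _
  unfold Spec_serie9
  exact serie9_alt_eq n
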